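-- pv_equiv track=rewrite | github.com/rettenls/ServerlessAggregation | Generator/Archive/single_threaded_producer.py | aggregate_along_tree
-- ===== SOURCE A (Python) =====
-- def aggregate_along_tree(data):
--
--     # Determine aggregation depth
--     aggregation_depth = max([key.count(":") for key in data.keys()])
--
--     # Start at max depth and go higher
--     for depth in range(aggregation_depth, 0, -1):
--         children = [key for key in data.keys() if key.count(":") == depth]
--         for child in children:
--             parent = child[:child.rfind(":")]
--             if parent not in data:
--                 data[parent] = data[child]
--             else:
--                 data[parent] += data[child]
--
--     return data
-- ===== SOURCE B (Python) =====
-- def aggregate_along_tree(data):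
--     # Bucket keys by depth in a single pass; process buckets deepest-first,
--     # appending newly created parents to their own depth's bucket.
--     buckets = {}
--     for key in data:
--         buckets.setdefault(key.count(":"), []).append(key)
--     depth = max(buckets, default=0)
--     while depth > 0:
--         for child in buckets.get(depth, []):
--             parent = child[:child.rfind(":")]
--             if parent not in data:
--                 data[parent] = data[child]
--                 buckets.setdefault(parent.count(":"), []).append(parent)
--             else:
--                 data[parent] += data[child]
--         depth -= 1
--     return data
-- ===== Notes on version B (the rewrite author's own statement) =====
-- stated objective: alternative
-- what changed: Instead of re-scanning every key of the dict at each depth level to collect that level's children, B buckets all keys by colon-depth in a single pass and processes the buckets deepest-first, appending each newly created parent to its own depth's bucket.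
import Mathlib
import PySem

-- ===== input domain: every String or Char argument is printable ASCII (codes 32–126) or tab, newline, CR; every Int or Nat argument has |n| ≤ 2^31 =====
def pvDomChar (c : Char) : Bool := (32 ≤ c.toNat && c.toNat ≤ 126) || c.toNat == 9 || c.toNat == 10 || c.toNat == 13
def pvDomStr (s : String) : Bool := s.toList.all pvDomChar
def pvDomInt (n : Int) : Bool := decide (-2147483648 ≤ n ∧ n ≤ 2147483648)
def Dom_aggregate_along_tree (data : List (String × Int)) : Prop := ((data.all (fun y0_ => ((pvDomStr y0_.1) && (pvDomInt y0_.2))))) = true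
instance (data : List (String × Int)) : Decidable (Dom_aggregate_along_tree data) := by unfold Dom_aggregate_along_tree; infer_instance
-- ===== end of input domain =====

-- B buckets the keys by colon-depth in one pass and processes buckets deepest-first
-- (A re-scans all keys at every depth); objective: alternative. Like A, the Python B
-- mutates the argument dict in place; the equivalence proved here is about the return value.


-- shared tiny primitives: key.count(":") and child[:child.rfind(":")]
def pvCount (k : String) : Int := (PySem.Str.count k ":" : Int)

def pvParent (child : String) : String :=
  PySem.Str.slice child none (some (PySem.Str.rfind child ":"))

-- ===== PORT A =====
-- body of A's inner loop over `children`; `data[child]` is ported as getD: `child`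
-- is always a present key (children come from data.keys() and keys are never removed)
def pvStepA (d : PySem.Dict String Int) (child : String) : PySem.Dict String Int :=
  let parent := pvParent child
  if d.contains parent then
    d.modify parent 0 (fun v => v + d.getD child 0)    -- data[parent] += data[child]
  else
    d.insert parent (d.getD child 0)                   -- data[parent] = data[child]

-- one iteration of A's `for depth in range(...)` loop: recompute children, fold over them
def pvLevelA (d : PySem.Dict String Int) (depth : Int) : PySem.Dict String Int :=
  (d.keys.filter (fun k => pvCount k == depth)).foldl pvStepA d

def aggregate_along_tree (data : List (String × Int)) : List (String × Int) :=
  let d := PySem.Dict.ofList data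
  match PySem.List.max? (d.keys.map pvCount) (fun x => x) with
  | none => []   -- empty dict: Python raises ValueError (max of empty); excluded by Pre_
  | some aggregation_depth =>
      ((PySem.List.pyRange aggregation_depth 0 (-1)).foldl pvLevelA d).items

-- ===== PORT B =====
-- body of B's inner loop; state = (data, buckets); `data[child]` as getD (child is
-- always a present key: buckets hold original keys and already-inserted parents)
def pvStepB (p : PySem.Dict String Int × PySem.Dict Int (List String)) (child : String) :
    PySem.Dict String Int × PySem.Dict Int (List String) :=
  let parent := pvParent child
  if p.1.contains parent then
    (p.1.modify parent 0 (fun v => v + p.1.getD child 0), p.2)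
  else
    (p.1.insert parent (p.1.getD child 0),
     p.2.modify (pvCount parent) [] (fun l => l ++ [parent]))   -- buckets.setdefault(...).append(parent)

-- B's `while depth > 0` loop, counting down; fuel = the starting depth
def pvLoopB : Nat → PySem.Dict String Int × PySem.Dict Int (List String) →
    PySem.Dict String Int × PySem.Dict Int (List String)
  | 0, p => p
  | n + 1, p => pvLoopB n ((p.2.getD ((n : Int) + 1) []).foldl pvStepB p)

def aggregate_along_tree_alt (data : List (String × Int)) : List (String × Int) :=
  let d := PySem.Dict.ofList data
  let buckets := d.keys.foldl
    (fun (b : PySem.Dict Int (List String)) k => b.modify (pvCount k) [] (fun l => l ++ [k]))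
    PySem.Dict.empty
  let maxd := (PySem.List.max? buckets.keys (fun x => x)).getD 0
  (pvLoopB maxd.toNat (d, buckets)).1.items

-- ===== PRECONDITION & SPEC =====
-- Pre_ excludes only the empty dict, on which A raises ValueError (max of an empty sequence).
def Pre_aggregate_along_tree (data : List (String × Int)) : Prop := data ≠ []
instance (data : List (String × Int)) : Decidable (Pre_aggregate_along_tree data) := by
  unfold Pre_aggregate_along_tree; infer_instance

def pvWitness_aggregate_along_tree : (List (String × Int)) := [("a:b", 1), ("a", 2)]

def Spec_aggregate_along_tree (data : List (String × Int)) (out : List (String × Int)) : Prop :=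
  out = aggregate_along_tree_alt data
instance (data : List (String × Int)) (out : List (String × Int)) :
    Decidable (Spec_aggregate_along_tree data out) := by
  unfold Spec_aggregate_along_tree; infer_instance

-- ===== CLAIM (what is proved, stated in full; the proofs are below) =====
def Claim_equal_aggregate_along_tree : Prop :=
  ∀ (data : List (String × Int)), Dom_aggregate_along_tree data →
    Pre_aggregate_along_tree data →
    Spec_aggregate_along_tree data (aggregate_along_tree data)

-- ===== LEMMAS AND PROOFS =====

-- the B-side invariant: every bucket holds exactly the current keys of its depth, in order
def pvInv (p : PySem.Dict String Int × PySem.Dict Int (List String)) : Prop :=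
  ∀ s : Int, p.2.getD s [] = p.1.keys.filter (fun k => pvCount k == s)

-- one step of B: the dict component is exactly A's step
theorem pvStepB_fst (p : PySem.Dict String Int × PySem.Dict Int (List String)) (c : String) :
    (pvStepB p c).1 = pvStepA p.1 c := by
  unfold pvStepA pvStepB
  by_cases h : p.1.contains (pvParent c) <;> simp [h]

-- one step of B preserves the bucket invariant
theorem pvStepB_inv (p : PySem.Dict String Int × PySem.Dict Int (List String)) (c : String)
    (h : pvInv p) : pvInv (pvStepB p c) := by
  intro s
  unfold pvStepB
  by_cases hc : p.1.contains (pvParent c)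
  · simp only [hc, if_true]
    have hk : ((p.1.modify (pvParent c) 0 (fun v => v + p.1.getD c 0)).keys) = p.1.keys := by
      rw [PySem.Dict.keys_modify, PySem.Dict.keys_insert_of_contains _ _ hc]
    simpa [hk] using h s
  · rw [Bool.not_eq_true] at hc
    simp only [hc, Bool.false_eq_true, if_false]
    rw [PySem.Dict.keys_insert_of_not_contains _ _ hc, List.filter_append,
        PySem.Dict.getD_modify, h s]
    by_cases hs : s = pvCount (pvParent c)
    · simp [hs, h (pvCount (pvParent c))]
    · have hne : (pvCount (pvParent c) == s) = false := by
        simp only [beq_eq_false_iff_ne, ne_eq]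
        exact fun h' => hs h'.symm
      simp [hs, hne]

-- fold over one children list: dict components agree and the invariant is preserved
theorem pvFoldB_eq (children : List String)
    (p : PySem.Dict String Int × PySem.Dict Int (List String)) (h : pvInv p) :
    (children.foldl pvStepB p).1 = children.foldl pvStepA p.1 ∧
      pvInv (children.foldl pvStepB p) := by
  induction children generalizing p with
  | nil => exact ⟨rfl, h⟩
  | cons c t ih =>
      have h' := pvStepB_inv p c h
      have := ih (pvStepB p c) h'
      simpa [List.foldl_cons, pvStepB_fst p c] using this

-- B's countdown loop computes A's foldl over range(n, 0, -1)
theorem pvLoopB_eq (n : Nat) (p : PySem.Dict String Int × PySem.Dict Int (List String))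
    (h : pvInv p) :
    (pvLoopB n p).1 = (PySem.List.pyRange (n : Int) 0 (-1)).foldl pvLevelA p.1 := by
  induction n generalizing p with
  | zero => rw [PySem.List.pyRange_neg_one_eq_nil (by norm_num)]; rfl
  | succ n ih =>
      have hrange : PySem.List.pyRange ((n + 1 : Nat) : Int) 0 (-1) =
          ((n : Int) + 1) :: PySem.List.pyRange ((n : Int)) 0 (-1) := by
        rw [PySem.List.pyRange_neg_one_cons (by push_cast; omega)]
        push_cast
        ring_nf
      have hchildren : p.2.getD ((n : Int) + 1) [] =
          p.1.keys.filter (fun k => pvCount k == ((n : Int) + 1)) := h _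
      obtain ⟨hfst, hinv⟩ := pvFoldB_eq (p.2.getD ((n : Int) + 1) []) p h
      have := ih _ hinv
      rw [show pvLoopB (n + 1) p = pvLoopB n ((p.2.getD ((n : Int) + 1) []).foldl pvStepB p) from rfl,
          this, hrange, List.foldl_cons, hfst, hchildren]
      rfl

-- the initial buckets satisfy the invariant
theorem pvBuckets_inv (d : PySem.Dict String Int) :
    pvInv (d, d.keys.foldl
      (fun (b : PySem.Dict Int (List String)) k => b.modify (pvCount k) [] (fun l => l ++ [k]))
      PySem.Dict.empty) := by
  intro s
  have hmap : d.keys.foldl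
      (fun (b : PySem.Dict Int (List String)) k => b.modify (pvCount k) [] (fun l => l ++ [k]))
      PySem.Dict.empty =
      (d.keys.map (fun k => (pvCount k, k))).foldl
        (fun (b : PySem.Dict Int (List String)) p => b.modify p.1 [] (fun l => l ++ [p.2]))
        PySem.Dict.empty := by
    rw [List.foldl_map]
  rw [hmap, PySem.Dict.getD_foldl_modify_append, PySem.Dict.getD_empty, List.filter_map,
      List.map_map]
  simp [Function.comp_def]

-- both maxima agree: max over the key list equals max over the bucket keys (its dedup)
theorem pvMax_eq (xs : List Int) (m : Int) (h : PySem.List.max? xs (fun x => x) = some m) :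
    PySem.List.max? (PySem.Set.ofList xs) (fun x => x) = some m := by
  have hne : PySem.Set.ofList xs ≠ [] := by
    intro hnil
    have hm := PySem.List.max?_mem h
    have : m ∈ PySem.Set.ofList xs := (PySem.Set.mem_ofList xs m).2 hm
    simp [hnil] at this
  obtain ⟨m', hm'⟩ : ∃ m', PySem.List.max? (PySem.Set.ofList xs) (fun x => x) = some m' := by
    cases hx : PySem.List.max? (PySem.Set.ofList xs) (fun x => x) with
    | none => exact absurd ((PySem.List.max?_eq_none_iff _ _).1 hx) hne
    | some m' => exact ⟨m', rfl⟩
  have h1 : m' ≤ m :=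
    PySem.List.max?_isMax h m' ((PySem.Set.mem_ofList xs m').1 (PySem.List.max?_mem hm'))
  have h2 : m ≤ m' :=
    PySem.List.max?_isMax hm' m ((PySem.Set.mem_ofList xs m).2 (PySem.List.max?_mem h))
  rw [hm', le_antisymm h1 h2]

-- the bucket keys are exactly the distinct depths of the original keys
theorem pvBucketsKeys (d : PySem.Dict String Int) :
    (d.keys.foldl
      (fun (b : PySem.Dict Int (List String)) k => b.modify (pvCount k) [] (fun l => l ++ [k]))
      PySem.Dict.empty).keys = PySem.Set.ofList (d.keys.map pvCount) := by
  rw [PySem.Dict.keys_foldl_modify_key d.keys pvCount [] (fun _ k l => l ++ [k]),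
      PySem.Dict.keys_empty, PySem.Set.update_nil_left]

-- a nonempty input dict has a nonempty key list
theorem pvKeys_ne (x : String × Int) (l : List (String × Int)) :
    (PySem.Dict.ofList (x :: l)).keys ≠ [] := by
  intro h
  have hk : (PySem.Dict.ofList (x :: l)).keys =
      PySem.Set.ofList ((x :: l).map Prod.fst) := by
    show (List.foldl (fun acc p => acc.insert p.1 p.2) PySem.Dict.empty (x :: l)).keys = _
    rw [PySem.Dict.keys_foldl_insert_key (x :: l) Prod.fst (fun _ p => p.2) PySem.Dict.empty,
        PySem.Dict.keys_empty, PySem.Set.update_nil_left]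
  have : x.1 ∈ (PySem.Dict.ofList (x :: l)).keys := by
    rw [hk]; exact (PySem.Set.mem_ofList _ _).2 (by simp)
  simp [h] at this
-- ===== VERDICT (by name: the statement is the Claim_ definition above) =====
theorem aggregate_along_tree_spec : Claim_equal_aggregate_along_tree := by
  intro data _ hpre
  unfold Spec_aggregate_along_tree aggregate_along_tree aggregate_along_tree_alt
  obtain ⟨x, l, rfl⟩ : ∃ x l, data = x :: l := by
    cases data with
    | nil => exact absurd rfl hpre
    | cons x l => exact ⟨x, l, rfl⟩
  set d := PySem.Dict.ofList (x :: l) with hd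
  have hkeys := pvKeys_ne x l
  obtain ⟨m, hm⟩ : ∃ m, PySem.List.max? (d.keys.map pvCount) (fun x => x) = some m := by
    cases hx : PySem.List.max? (d.keys.map pvCount) (fun x => x) with
    | none =>
        exact absurd (List.map_eq_nil_iff.1 ((PySem.List.max?_eq_none_iff _ _).1 hx)) hkeys
    | some m => exact ⟨m, rfl⟩
  have hmmem : m ∈ d.keys.map pvCount := PySem.List.max?_mem hm
  have hm0 : 0 ≤ m := by
    obtain ⟨k, _, rfl⟩ := List.mem_map.1 hmmem
    exact Int.natCast_nonneg _
  have hmax2 := pvMax_eq (d.keys.map pvCount) m hm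
  have hcast : ((m.toNat : Nat) : Int) = m := Int.toNat_of_nonneg hm0
  simp only [hm, pvBucketsKeys d, hmax2, Option.getD_some]
  rw [pvLoopB_eq m.toNat (d, _) (pvBuckets_inv d), hcast]
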